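-- pv_equiv track=rewrite | github.com/hnorjordet/xliff-regex-tool | src/regex_engine/regex_processor.py | _map_to_original_position
-- ===== SOURCE A (Python) =====
-- from typing import List, Dict, Tuple, Optional, Callable
--
-- def _map_to_original_position(
--                               plain_pos: int,
--                               text_segments: List[str],
--                               tag_positions: List[Tuple[int, int, str]]) -> int:
--     """
--     Map position in plain text (without tags) back to original position (with tags).
--     """
--     char_count = 0
--     original_pos = 0
--
--     for i, segment in enumerate(text_segments):
--         if char_count + len(segment) >= plain_pos:
--             # Position is in this segment
--             offset = plain_pos - char_count
--             return original_pos + offset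
--
--         char_count += len(segment)
--         original_pos += len(segment)
--
--         # Add tag length if there's a tag after this segment
--         if i < len(tag_positions):
--             tag_start, tag_end, tag_content = tag_positions[i]
--             original_pos += len(tag_content)
--
--     return original_pos
-- ===== SOURCE B (Python) =====
-- from typing import List, Tuple
--
-- def _map_to_original_position(
--                               plain_pos: int,
--                               text_segments: List[str],
--                               tag_positions: List[Tuple[int, int, str]]) -> int:
--     # Table-then-search: build prefix sums of segment lengths and cumulative
--     # tag offsets, then binary-search the first prefix >= plain_pos.
--     prefix = []
--     total = 0
--     for seg in text_segments:
--         total += len(seg)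
--         prefix.append(total)
--
--     tag_lens = ([len(t[2]) for t in tag_positions]
--                 + [0] * len(text_segments))[:len(text_segments)]
--     tagoff = [0]
--     off = 0
--     for t in tag_lens:
--         off += t
--         tagoff.append(off)
--
--     lo, hi = 0, len(prefix)
--     while lo < hi:
--         mid = (lo + hi) // 2
--         if prefix[mid] < plain_pos:
--             lo = mid + 1
--         else:
--             hi = mid
--     if lo < len(prefix):
--         return plain_pos + tagoff[lo]
--     return total + off
-- ===== Notes on version B (the rewrite author's own statement) =====
-- stated objective: alternative
-- what changed: Replaces the fused lockstep scan (char_count/original_pos accumulators with early return) by a table-then-search decomposition: prefix-sum and cumulative-tag-offset tables built first, then a binary search for the first prefix >= plain_pos.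
import Mathlib
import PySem

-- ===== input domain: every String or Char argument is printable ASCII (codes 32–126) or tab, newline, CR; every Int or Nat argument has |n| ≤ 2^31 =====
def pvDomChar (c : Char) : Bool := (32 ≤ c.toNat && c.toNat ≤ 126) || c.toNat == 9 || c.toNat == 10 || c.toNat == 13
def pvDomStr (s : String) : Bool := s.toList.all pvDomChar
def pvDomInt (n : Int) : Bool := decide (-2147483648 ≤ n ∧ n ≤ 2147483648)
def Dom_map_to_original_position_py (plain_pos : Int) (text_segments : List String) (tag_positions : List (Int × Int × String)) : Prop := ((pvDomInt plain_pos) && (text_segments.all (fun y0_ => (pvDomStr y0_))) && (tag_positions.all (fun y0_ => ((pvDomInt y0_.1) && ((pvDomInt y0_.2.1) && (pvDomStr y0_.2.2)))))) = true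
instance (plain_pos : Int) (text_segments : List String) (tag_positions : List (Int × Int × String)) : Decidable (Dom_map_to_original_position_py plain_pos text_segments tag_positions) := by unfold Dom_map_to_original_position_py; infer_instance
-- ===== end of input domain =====

-- ===== PORT A =====
-- B builds prefix-sum/tag-offset tables and binary-searches them instead of A's fused lockstep scan (objective: alternative decomposition).

-- A's for-loop: state (i, char_count, original_pos), early return inside the loop.
def aLoop (plain_pos : Int) (tag_positions : List (Int × Int × String)) :
    List String → Nat → Int → Int → Int
  | [], _, _, original_pos => original_pos
  | segment :: rest, i, char_count, original_pos =>
    if plain_pos ≤ char_count + PySem.Str.len segment then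
      original_pos + (plain_pos - char_count)
    else
      let char_count' := char_count + PySem.Str.len segment
      let original_pos' := original_pos + PySem.Str.len segment
      let original_pos'' :=
        if i < tag_positions.length then
          match PySem.List.pyGet? tag_positions (i : Int) with
          | some (_, _, tag_content) => original_pos' + PySem.Str.len tag_content
          | none => original_pos'
        else original_pos'
      aLoop plain_pos tag_positions rest (i + 1) char_count' original_pos''

def map_to_original_position_py (plain_pos : Int) (text_segments : List String) (tag_positions : List (Int × Int × String)) : Int :=
  aLoop plain_pos tag_positions text_segments 0 0 0

-- ===== PORT B =====
-- 'total += len(seg); prefix.append(total)' loop: returns (prefix list, final total).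
def altScan : List String → Int → (List Int × Int)
  | [], total => ([], total)
  | seg :: rest, total =>
    let t := total + PySem.Str.len seg
    let r := altScan rest t
    (t :: r.1, r.2)

-- 'off += t; tagoff.append(off)' loop: returns (appended entries, final off).
def altScan2 : List Int → Int → (List Int × Int)
  | [], off => ([], off)
  | t :: rest, off =>
    let o := off + t
    let r := altScan2 rest o
    (o :: r.1, r.2)

def map_to_original_position_py_alt (plain_pos : Int) (text_segments : List String) (tag_positions : List (Int × Int × String)) : Int :=
  let scan := altScan text_segments 0
  let pref := scan.1
  let total := scan.2
  let tag_lens := ((tag_positions.map fun t : Int × Int × String => PySem.Str.len t.2.2)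
                    ++ List.replicate text_segments.length 0).take text_segments.length
  let scan2 := altScan2 tag_lens 0
  let tagoff := (0 : Int) :: scan2.1
  let off := scan2.2
  -- hand-written binary search in Source B is exactly Python's bisect_left loop
  let lo := PySem.List.bisectLeft pref plain_pos
  if lo < pref.length then plain_pos + tagoff.getD lo 0
  else total + off

-- ===== PRECONDITION & SPEC =====
def Spec_map_to_original_position_py (plain_pos : Int) (text_segments : List String) (tag_positions : List (Int × Int × String)) (out : Int) : Prop := out = map_to_original_position_py_alt plain_pos text_segments tag_positions
instance (plain_pos : Int) (text_segments : List String) (tag_positions : List (Int × Int × String)) (out : Int) : Decidable (Spec_map_to_original_position_py plain_pos text_segments tag_positions out) := by unfold Spec_map_to_original_position_py; infer_instance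

-- ===== CLAIM (what is proved, stated in full; the proofs are below) =====
def Claim_equal_map_to_original_position_py : Prop := ∀ (plain_pos : Int) (text_segments : List String) (tag_positions : List (Int × Int × String)), Dom_map_to_original_position_py plain_pos text_segments tag_positions → Spec_map_to_original_position_py plain_pos text_segments tag_positions (map_to_original_position_py plain_pos text_segments tag_positions)

-- ===== LEMMAS AND PROOFS =====

-- reference function: per-segment recursion on (segment lengths, tag lengths)
def ref (plain : Int) : List Int → List Int → Int
  | [], _ => 0
  | l :: ls, tl => if plain ≤ l then plain else l + tl.headD 0 + ref (plain - l) ls tl.tail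

theorem len_nonneg (s : String) : 0 ≤ PySem.Str.len s := by
  simp [PySem.Str.len_eq]

-- ===== A = ref =====
theorem drop_map_headD (tags : List (Int × Int × String)) (i : Nat) :
    ((tags.drop i).map fun t => PySem.Str.len t.2.2).headD 0
      = match PySem.List.pyGet? tags (i : Int) with
        | some t => PySem.Str.len t.2.2
        | none => 0 := by
  rw [PySem.List.pyGet?_natCast]
  rw [List.headD_eq_head?_getD, List.head?_map, List.head?_drop]
  cases tags[i]? <;> simp

theorem aLoop_eq_ref (plain : Int) (tags : List (Int × Int × String)) (segs : List String)
    (i : Nat) (cc op : Int) :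
    aLoop plain tags segs i cc op
      = op + ref (plain - cc) (segs.map PySem.Str.len)
              ((tags.drop i).map fun t => PySem.Str.len t.2.2) := by
  induction segs generalizing i cc op with
  | nil => simp [aLoop, ref]
  | cons s rest ih =>
    have hop : (if i < tags.length then
          match PySem.List.pyGet? tags (i : Int) with
          | some (_, _, tag_content) => op + PySem.Str.len s + PySem.Str.len tag_content
          | none => op + PySem.Str.len s
        else op + PySem.Str.len s)
        = op + PySem.Str.len s + (((tags.drop i).map fun t => PySem.Str.len t.2.2).headD 0) := by
      rw [drop_map_headD]
      by_cases hi : i < tags.length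
      · rw [if_pos hi]
        rw [show PySem.List.pyGet? tags (i : Int) = some tags[i] by
          rw [PySem.List.pyGet?_natCast]; simp [hi]]
        rcases htg : tags[i] with ⟨a, b, c⟩
        rfl
      · rw [if_neg hi]
        rw [show PySem.List.pyGet? tags (i : Int) = none by
          rw [PySem.List.pyGet?_natCast]; simp; omega]
        simp
    rw [show aLoop plain tags (s :: rest) i cc op
        = if plain ≤ cc + PySem.Str.len s then op + (plain - cc)
          else aLoop plain tags rest (i + 1) (cc + PySem.Str.len s)
            (if i < tags.length then
              match PySem.List.pyGet? tags (i : Int) with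
              | some (_, _, tag_content) => op + PySem.Str.len s + PySem.Str.len tag_content
              | none => op + PySem.Str.len s
            else op + PySem.Str.len s) from rfl]
    rw [show ref (plain - cc) ((s :: rest).map PySem.Str.len)
          ((tags.drop i).map fun t => PySem.Str.len t.2.2)
        = if plain - cc ≤ PySem.Str.len s then plain - cc
          else PySem.Str.len s + (((tags.drop i).map fun t => PySem.Str.len t.2.2).headD 0)
            + ref (plain - cc - PySem.Str.len s) (rest.map PySem.Str.len)
              (((tags.drop i).map fun t => PySem.Str.len t.2.2).tail) from rfl]
    by_cases hc : plain ≤ cc + PySem.Str.len s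
    · rw [if_pos hc, if_pos (by omega)]
    · rw [if_neg hc, hop, if_neg (show ¬ plain - cc ≤ PySem.Str.len s by omega), ih]
      rw [show ((tags.drop i).map fun t => PySem.Str.len t.2.2).tail
          = (tags.drop (i + 1)).map fun t => PySem.Str.len t.2.2 by
        rw [← List.map_tail, List.tail_drop]]
      ring_nf

-- ===== scan characterizations =====
theorem altScan_fst_length (segs : List String) (c : Int) :
    (altScan segs c).1.length = segs.length := by
  induction segs generalizing c with
  | nil => simp [altScan]
  | cons s rest ih => simp [altScan, ih]

theorem altScan_snd (segs : List String) (c : Int) :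
    (altScan segs c).2 = c + ((segs.map PySem.Str.len).sum) := by
  induction segs generalizing c with
  | nil => simp [altScan]
  | cons s rest ih => simp [altScan, ih]; ring

theorem altScan_get (segs : List String) (c : Int) (j : Nat) (hj : j < segs.length) :
    (altScan segs c).1.getD j 0 = c + (((segs.map PySem.Str.len).take (j + 1)).sum) := by
  induction segs generalizing c j with
  | nil => simp at hj
  | cons s rest ih =>
    cases j with
    | zero => simp [altScan]
    | succ j =>
      simp only [altScan, List.getD_cons_succ, List.map_cons, List.take_succ_cons,
        List.sum_cons]
      rw [ih _ j (by simpa using hj)]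
      ring

theorem altScan2_fst_getD (tl : List Int) (c : Int) (j : Nat) (hj : j < tl.length) :
    (altScan2 tl c).1.getD j 0 = c + (tl.take (j + 1)).sum := by
  induction tl generalizing c j with
  | nil => simp at hj
  | cons t rest ih =>
    cases j with
    | zero => simp [altScan2]
    | succ j =>
      simp only [altScan2, List.getD_cons_succ, List.take_succ_cons, List.sum_cons]
      rw [ih _ j (by simpa using hj)]
      ring

theorem altScan2_snd (tl : List Int) (c : Int) :
    (altScan2 tl c).2 = c + tl.sum := by
  induction tl generalizing c with
  | nil => simp [altScan2]
  | cons t rest ih => simp [altScan2, ih]; ring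

-- ===== ref facts =====
theorem getD_tail (tl : List Int) (j : Nat) : tl.tail.getD j 0 = tl.getD (j + 1) 0 := by
  cases tl <;> simp

theorem ref_congr (plain : Int) (ls tl tl' : List Int)
    (h : ∀ j, j < ls.length → tl.getD j 0 = tl'.getD j 0) :
    ref plain ls tl = ref plain ls tl' := by
  induction ls generalizing plain tl tl' with
  | nil => simp [ref]
  | cons l ls ih =>
    have h0 : tl.headD 0 = tl'.headD 0 := by
      have := h 0 (by simp)
      cases tl <;> cases tl' <;> simp_all [List.getD]
    simp only [ref, h0]
    rw [ih (plain - l) tl.tail tl'.tail]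
    intro j hj
    rw [getD_tail, getD_tail]
    exact h (j + 1) (by simp; omega)

theorem take_sum_mono (ls : List Int) (h0 : ∀ x ∈ ls, 0 ≤ x) (i j : Nat) (hij : i ≤ j) :
    (ls.take i).sum ≤ (ls.take j).sum := by
  have hsplit : ls.take j = ls.take i ++ (ls.take j).drop i := by
    have h1 : (ls.take j).take i = ls.take i := by
      rw [List.take_take]; congr 1; omega
    rw [← h1, List.take_append_drop]
  calc (ls.take i).sum ≤ (ls.take i).sum + ((ls.take j).drop i).sum := by
        have : 0 ≤ ((ls.take j).drop i).sum := by
          apply List.sum_nonneg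
          intro x hx
          exact h0 x (List.mem_of_mem_take (List.mem_of_mem_drop hx))
        omega
    _ = (ls.take j).sum := by conv_rhs => rw [hsplit, List.sum_append]

theorem headD_add_tail_take_sum (tl : List Int) (k : Nat) :
    tl.headD 0 + (tl.tail.take k).sum = (tl.take (k + 1)).sum := by
  cases tl <;> simp

theorem ref_of_k (plain : Int) (ls tl : List Int) (k : Nat) (hk : k ≤ ls.length)
    (hlow : ∀ j, j < k → (ls.take (j + 1)).sum < plain)
    (hhi : k < ls.length → plain ≤ (ls.take (k + 1)).sum) :
    ref plain ls tl
      = if k < ls.length then plain + (tl.take k).sum else ls.sum + (tl.take ls.length).sum := by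
  induction ls generalizing plain tl k with
  | nil =>
    simp at hk
    subst hk
    simp [ref]
  | cons l ls ih =>
    cases k with
    | zero =>
      have hle : plain ≤ l := by simpa using hhi (by simp)
      simp [ref, hle]
    | succ k =>
      have hl : l < plain := by simpa using hlow 0 (by omega)
      have hnle : ¬ plain ≤ l := by omega
      simp only [ref, hnle, if_false]
      rw [ih (plain - l) tl.tail k (by simpa using hk)
        (fun j hj => by have := hlow (j + 1) (by omega); simp at this; omega)
        (fun h => by have := hhi (by simpa using h); simp at this; omega)]
      by_cases hkl : k < ls.length
      · rw [if_pos hkl, if_pos (by simp; omega)]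
        rw [show (tl.take (k + 1)).sum = tl.headD 0 + (tl.tail.take k).sum from
          (headD_add_tail_take_sum tl k).symm]
        ring
      · rw [if_neg hkl, if_neg (by simp; omega)]
        rw [show (tl.take ((l :: ls).length)).sum = tl.headD 0 + (tl.tail.take ls.length).sum by
          rw [List.length_cons]; exact (headD_add_tail_take_sum tl ls.length).symm]
        simp only [List.sum_cons]
        ring

-- ===== VERDICT (by name: the statement is the Claim_ definition above) =====
theorem getD_take_append_replicate (A : List Int) (n j : Nat) (hj : j < n) :
    (((A ++ List.replicate n 0).take n).getD j 0) = A.getD j 0 := by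
  have h1 : ((A ++ List.replicate n 0).take n).getD j 0 = (A ++ List.replicate n 0).getD j 0 := by
    unfold List.getD
    rw [List.getElem?_take_of_lt hj]
  rw [h1]
  by_cases hA : j < A.length
  · unfold List.getD
    rw [List.getElem?_append_left hA]
  · unfold List.getD
    rw [List.getElem?_append_right (by omega), List.getElem?_eq_none (by omega : A.length ≤ j),
      List.getElem?_replicate]
    split <;> simp

theorem map_to_original_position_py_spec : Claim_equal_map_to_original_position_py := by
  intro plain segs tags _
  unfold Spec_map_to_original_position_py map_to_original_position_py map_to_original_position_py_alt
  dsimp only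
  have hA0 : aLoop plain tags segs 0 0 0
      = ref plain (segs.map PySem.Str.len) (tags.map fun t => PySem.Str.len t.2.2) := by
    rw [aLoop_eq_ref]
    simp
  rw [hA0]
  -- abbreviations
  have hlen : (altScan segs 0).1.length = segs.length := altScan_fst_length segs 0
  have hget : ∀ j, (hj : j < segs.length) →
      (altScan segs 0).1.getD j 0 = (((segs.map PySem.Str.len).take (j + 1)).sum) := by
    intro j hj
    rw [altScan_get segs 0 j hj]
    ring
  have hnn : ∀ x ∈ segs.map PySem.Str.len, 0 ≤ x := by
    intro x hx
    rcases List.mem_map.mp hx with ⟨s, _, rfl⟩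
    exact len_nonneg s
  have hsorted : List.Pairwise (fun a b => a ≤ b) (altScan segs 0).1 := by
    rw [List.pairwise_iff_getElem]
    intro i j hi hj hij
    rw [← List.getD_eq_getElem _ 0 hi, ← List.getD_eq_getElem _ 0 hj]
    rw [hget i (by omega), hget j (by omega)]
    exact take_sum_mono _ hnn _ _ (by omega)
  obtain ⟨hk, hlow', hhi'⟩ := PySem.List.bisectLeft_spec (altScan segs 0).1 plain hsorted
  -- tag-length table
  have hAlen : ∀ tlj, tlj < segs.length →
      ((((tags.map fun t : Int × Int × String => PySem.Str.len t.2.2)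
          ++ List.replicate segs.length 0).take segs.length).getD tlj 0)
        = ((tags.map fun t : Int × Int × String => PySem.Str.len t.2.2).getD tlj 0) :=
    fun j hj => getD_take_append_replicate _ _ j hj
  have htllen : (((tags.map fun t : Int × Int × String => PySem.Str.len t.2.2)
      ++ List.replicate segs.length 0).take segs.length).length = segs.length := by
    simp
  set tl := (((tags.map fun t : Int × Int × String => PySem.Str.len t.2.2)
      ++ List.replicate segs.length 0).take segs.length) with htl
  -- A's reference value over tl instead of the raw tag lengths
  have hcongr : ref plain (segs.map PySem.Str.len) (tags.map fun t => PySem.Str.len t.2.2)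
      = ref plain (segs.map PySem.Str.len) tl := by
    apply ref_congr
    intro j hj
    rw [hAlen j (by simpa using hj)]
  rw [hcongr]
  -- characterize A's value through the bisection index
  rw [ref_of_k plain (segs.map PySem.Str.len) tl (PySem.List.bisectLeft (altScan segs 0).1 plain)
      (by simpa [hlen] using hk)
      (by
        intro j hj
        have hjn : j < (altScan segs 0).1.length := by omega
        have := hlow' j hjn hj
        rw [← List.getD_eq_getElem _ 0 hjn, hget j (by omega)] at this
        exact this)
      (by
        intro hlt
        have hkn : PySem.List.bisectLeft (altScan segs 0).1 plain < (altScan segs 0).1.length := by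
          simpa [hlen] using hlt
        have := hhi' _ hkn (Nat.le_refl _)
        rw [← List.getD_eq_getElem _ 0 hkn, hget _ (by omega)] at this
        exact this)]
  -- now evaluate B's pieces
  rw [altScan_snd segs 0, altScan2_snd tl 0]
  have hmaplen : (segs.map PySem.Str.len).length = segs.length := by simp
  by_cases hcase : PySem.List.bisectLeft (altScan segs 0).1 plain < (altScan segs 0).1.length
  · rw [if_pos hcase, if_pos (by omega : PySem.List.bisectLeft (altScan segs 0).1 plain
      < (segs.map PySem.Str.len).length)]
    congr 1
    -- tagoff lookup = partial sum
    cases hkc : PySem.List.bisectLeft (altScan segs 0).1 plain with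
    | zero => simp
    | succ k' =>
      rw [List.getD_cons_succ]
      rw [altScan2_fst_getD tl 0 k' (by rw [htllen]; omega)]
      ring
  · rw [if_neg hcase, if_neg (by omega : ¬ PySem.List.bisectLeft (altScan segs 0).1 plain
      < (segs.map PySem.Str.len).length)]
    have : tl.take (segs.map PySem.Str.len).length = tl := by
      rw [hmaplen, ← htllen, List.take_length]
    rw [this]
    ring
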